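-- pv_equiv track=rewrite | github.com/facebookresearch/ParlAI | parlai/tasks/convai_chitchat/agents.py | _fold_utterances
-- ===== SOURCE A (Python) =====
-- def _fold_utterances(raw_dialog):
--     dialog = []
--     for utterance in raw_dialog:
--         if len(dialog) > 0 and dialog[-1]['userId'] == utterance['userId']:
--             dialog[-1]['text'] = dialog[-1]['text'] + '\n' + utterance['text']
--         else:
--             dialog.append(
--                 {'text': utterance['text'], 'userId': utterance['userId']}
--             )
--     return dialog
-- ===== SOURCE B (Python) =====
-- def _fold_utterances(raw_dialog):
--     # Group-first decomposition: scan each maximal run of consecutive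
--     # same-user utterances, then join its texts in one step.
--     result = []
--     i = 0
--     n = len(raw_dialog)
--     while i < n:
--         user_id = raw_dialog[i]['userId']
--         j = i
--         while j < n and raw_dialog[j]['userId'] == user_id:
--             j += 1
--         result.append({'text': '\n'.join(u['text'] for u in raw_dialog[i:j]),
--                        'userId': user_id})
--         i = j
--     return result
-- ===== Notes on version B (the rewrite author's own statement) =====
-- stated objective: alternative
-- what changed: Replaces A's stateful fold that mutates the last appended dict ('compare to dialog[-1], concatenate text') with a run-based decomposition: find each maximal run of consecutive same-user utterances, then build its folded dict in one step with '\n'.join over the run.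
import Mathlib
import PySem

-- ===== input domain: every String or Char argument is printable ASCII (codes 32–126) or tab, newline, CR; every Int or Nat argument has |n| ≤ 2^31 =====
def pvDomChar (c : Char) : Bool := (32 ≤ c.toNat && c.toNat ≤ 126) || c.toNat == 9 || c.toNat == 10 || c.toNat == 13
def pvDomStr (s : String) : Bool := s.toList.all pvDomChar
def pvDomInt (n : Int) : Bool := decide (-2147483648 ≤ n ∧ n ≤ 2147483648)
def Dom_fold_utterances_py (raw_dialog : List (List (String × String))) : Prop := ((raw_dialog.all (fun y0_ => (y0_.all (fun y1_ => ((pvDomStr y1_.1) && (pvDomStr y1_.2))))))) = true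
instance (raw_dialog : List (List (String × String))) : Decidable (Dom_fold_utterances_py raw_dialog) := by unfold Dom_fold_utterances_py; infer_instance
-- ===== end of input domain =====

-- B replaces A's stateful fold (mutate the last appended dict) with a run-based
-- decomposition (scan each maximal same-user run, join its texts once); same cost.

-- ===== PORT A =====
-- first-match lookup u['userId'] / u['text']; the "" default is never reached inside Pre_
def pvKey (u : List (String × String)) : String := PySem.Dict.getD (PySem.Dict.mk u) "userId" ""
def pvText (u : List (String × String)) : String := PySem.Dict.getD (PySem.Dict.mk u) "text" ""

-- one iteration of A's for-loop: mutate dialog[-1]['text'] in place, or append a fresh dict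
def stepA (dialog : List (List (String × String))) (u : List (String × String)) :
    List (List (String × String)) :=
  let last := (dialog.getLast?).getD []
  if 0 < dialog.length ∧ pvKey last = pvKey u then
    dialog.dropLast ++
      [((PySem.Dict.mk last).insert "text" (pvText last ++ "\n" ++ pvText u)).items]
  else
    dialog ++ [[("text", pvText u), ("userId", pvKey u)]]

def fold_utterances_py (raw_dialog : List (List (String × String))) : List (List (String × String)) :=
  raw_dialog.foldl stepA []

-- ===== PORT B =====
def fold_utterances_py_alt (raw_dialog : List (List (String × String))) : List (List (String × String)) :=
  match raw_dialog with
  | [] => []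
  | u :: rest =>
    let k := pvKey u
    let run := rest.takeWhile (fun v => pvKey v == k)
    [("text", PySem.Str.join "\n" ((u :: run).map pvText)), ("userId", k)]
      :: fold_utterances_py_alt (rest.dropWhile (fun v => pvKey v == k))
termination_by raw_dialog.length
decreasing_by
  simpa using Nat.lt_succ_of_le (List.length_dropWhile_le _ _)

-- ===== PRECONDITION & SPEC =====
-- Pre_ excludes exactly the inputs where Python A raises KeyError: an utterance
-- missing the 'userId' or 'text' key (A reads both keys of every utterance).
def Pre_fold_utterances_py (raw_dialog : List (List (String × String))) : Prop :=
  (raw_dialog.all (fun u => u.any (fun p => p.1 == "userId") && u.any (fun p => p.1 == "text"))) = true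
instance (raw_dialog : List (List (String × String))) : Decidable (Pre_fold_utterances_py raw_dialog) := by
  unfold Pre_fold_utterances_py; infer_instance

def pvWitness_fold_utterances_py : (List (List (String × String))) :=
  [[("text", "hi"), ("userId", "u1")], [("text", "there"), ("userId", "u1")],
   [("text", "yo"), ("userId", "u2")]]

def Spec_fold_utterances_py (raw_dialog : List (List (String × String))) (out : List (List (String × String))) : Prop := out = fold_utterances_py_alt raw_dialog
instance (raw_dialog : List (List (String × String))) (out : List (List (String × String))) : Decidable (Spec_fold_utterances_py raw_dialog out) := by unfold Spec_fold_utterances_py; infer_instance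

-- ===== CLAIM (what is proved, stated in full; the proofs are below) =====
def Claim_equal_fold_utterances_py : Prop := ∀ (raw_dialog : List (List (String × String))), Dom_fold_utterances_py raw_dialog → Pre_fold_utterances_py raw_dialog → Spec_fold_utterances_py raw_dialog (fold_utterances_py raw_dialog)

-- ===== LEMMAS AND PROOFS =====

-- the dict A appends: {'text': t, 'userId': k}
def mkd (t k : String) : List (String × String) := [("text", t), ("userId", k)]

-- A's loop, characterised: the merged text so far is t, its user is k
def mergeA (t k : String) (l : List (List (String × String))) :
    List (List (String × String)) :=
  match l with
  | [] => [mkd t k]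
  | u :: l' =>
    if pvKey u = k then mergeA (t ++ "\n" ++ pvText u) k l'
    else mkd t k :: mergeA (pvText u) (pvKey u) l'

theorem pvKey_mkd (t k : String) : pvKey (mkd t k) = k := by
  simp [pvKey, mkd, PySem.Dict.getD, PySem.Dict.get?]

theorem pvText_mkd (t k : String) : pvText (mkd t k) = t := by
  simp [pvText, mkd, PySem.Dict.getD, PySem.Dict.get?]

theorem insert_mkd (t k v : String) :
    ((PySem.Dict.mk (mkd t k)).insert "text" v).items = mkd v k := by
  simp [mkd, PySem.Dict.insert, PySem.Dict.contains]

theorem stepA_append (init : List (List (String × String))) (t k : String)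
    (u : List (String × String)) :
    stepA (init ++ [mkd t k]) u =
      if pvKey u = k then init ++ [mkd (t ++ "\n" ++ pvText u) k]
      else (init ++ [mkd t k]) ++ [mkd (pvText u) (pvKey u)] := by
  simp only [stepA, List.getLast?_append, List.getLast?_singleton,
    List.dropLast_concat]
  by_cases h : pvKey u = k
  · simp [h, pvKey_mkd, pvText_mkd, insert_mkd]
  · split_ifs with hc
    · exact absurd ((pvKey_mkd t k).symm.trans hc.2).symm h
    · rfl

theorem foldl_stepA_eq_mergeA (l : List (List (String × String)))
    (init : List (List (String × String))) (t k : String) :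
    List.foldl stepA (init ++ [mkd t k]) l = init ++ mergeA t k l := by
  induction l generalizing init t k with
  | nil => simp [mergeA]
  | cons u l' ih =>
    rw [List.foldl_cons, stepA_append]
    by_cases h : pvKey u = k
    · rw [if_pos h]; simp only [mergeA, if_pos h, ih]
    · rw [if_neg h, ih (init ++ [mkd t k]) (pvText u) (pvKey u)]
      simp [mergeA, h]

theorem strJoin_cons (t s : String) (rest : List String) :
    PySem.Str.join "\n" ((t ++ "\n" ++ s) :: rest) =
      PySem.Str.join "\n" (t :: s :: rest) := by
  cases rest with
  | nil =>
    simp [PySem.Str.join, PySem.Chars.join, List.intercalate, List.intersperse]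
  | cons r rs =>
    simp [PySem.Str.join, PySem.Chars.join_cons_cons]

theorem strJoin_singleton (t : String) : PySem.Str.join "\n" [t] = t := by
  simp [PySem.Str.join, PySem.Chars.join, List.intercalate]

theorem alt_cons (u : List (String × String)) (rest : List (List (String × String))) :
    fold_utterances_py_alt (u :: rest) =
      mkd (PySem.Str.join "\n" ((u :: rest.takeWhile (fun v => pvKey v == pvKey u)).map pvText)) (pvKey u)
        :: fold_utterances_py_alt (rest.dropWhile (fun v => pvKey v == pvKey u)) := by
  rw [fold_utterances_py_alt]
  simp [mkd]

theorem mergeA_eq_alt (l : List (List (String × String))) (t k : String) :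
    mergeA t k l =
      mkd (PySem.Str.join "\n" (t :: (l.takeWhile (fun v => pvKey v == k)).map pvText)) k
        :: fold_utterances_py_alt (l.dropWhile (fun v => pvKey v == k)) := by
  induction l generalizing t k with
  | nil => simp [mergeA, fold_utterances_py_alt, strJoin_singleton]
  | cons u l' ih =>
    by_cases h : pvKey u = k
    · simp only [mergeA, List.takeWhile_cons, List.dropWhile_cons, h,
        BEq.rfl, if_true, List.map_cons, ih]
      rw [strJoin_cons]
    · have hb : (pvKey u == k) = false := by simp [h]
      simp only [mergeA, if_neg h, List.takeWhile_cons, List.dropWhile_cons, hb,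
        Bool.false_eq_true, if_false, List.map_nil]
      rw [strJoin_singleton, ih (pvText u) (pvKey u), alt_cons]
      simp

-- ===== VERDICT (by name: the statement is the Claim_ definition above) =====
theorem fold_utterances_py_spec : Claim_equal_fold_utterances_py := by
  intro raw_dialog _ _
  unfold Spec_fold_utterances_py
  cases raw_dialog with
  | nil => simp [fold_utterances_py, fold_utterances_py_alt]
  | cons u rest =>
    show List.foldl stepA (stepA [] u) rest = _
    have h0 : stepA [] u = [] ++ [mkd (pvText u) (pvKey u)] := by
      simp [stepA, mkd]
    rw [h0, foldl_stepA_eq_mergeA, List.nil_append, mergeA_eq_alt, alt_cons]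
    simp
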